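-- pv_equiv track=rewrite | github.com/denizxaytac/advent-of-code | 2015/day20/part1.py | solution
-- ===== SOURCE A (Python) =====
-- def solution(q_input):
--     q_input = q_input // 10
--     l = [0] * q_input
--     for i in range(1, q_input):
--         for j in range(i, q_input, i):
--             l[j] += i
--         if l[i] > q_input:
--             return i
-- ===== SOURCE B (Python) =====
-- def solution(q_input):
--     n = q_input // 10
--     for i in range(1, n):
--         s = 0
--         d = 1
--         while d * d <= i:
--             if i % d == 0:
--                 s += d
--                 c = i // d
--                 if d != c:
--                     s += c
--             d += 1
--         if s > n:
--             return i
--     return None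
-- ===== Notes on version B (the rewrite author's own statement) =====
-- stated objective: alternative
-- what changed: Replaced the shared mutable sieve table (adding each i to every multiple's slot, then checking slot i) by a direct per-house divisor sum computed by trial division up to sqrt(i), pairing each divisor d with its cofactor i//d; no array at all.
import Mathlib
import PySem

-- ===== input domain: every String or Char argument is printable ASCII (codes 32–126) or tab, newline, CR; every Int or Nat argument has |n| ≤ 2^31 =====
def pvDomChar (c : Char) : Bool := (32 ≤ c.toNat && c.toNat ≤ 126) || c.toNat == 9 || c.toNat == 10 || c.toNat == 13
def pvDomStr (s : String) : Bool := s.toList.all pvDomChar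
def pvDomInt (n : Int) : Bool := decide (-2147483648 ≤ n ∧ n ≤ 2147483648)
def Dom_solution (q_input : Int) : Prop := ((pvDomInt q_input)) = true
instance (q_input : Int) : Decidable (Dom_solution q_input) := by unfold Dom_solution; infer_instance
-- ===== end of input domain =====

-- B replaces A's shared sieve table by a direct per-house divisor sum via trial division up to sqrt(i) (alternative algorithm; no array).

-- ===== PORT A =====
-- inner loop 'for j in range(i, q_input, i): l[j] += i'
-- (every j produced by the range satisfies 0 ≤ j < len l, so pyGetD/pySetD are exact here)
def solInner (i N : Int) (l : List Int) : List Int :=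
  (PySem.List.pyRange i N i).foldl
    (fun l j => PySem.List.pySetD l j (PySem.List.pyGetD l j 0 + i)) l

-- outer loop 'for i in range(1, q_input): … ; if l[i] > q_input: return i'
def solLoop (N : Int) (l : List Int) : List Int → Option Int
  | [] => none
  | i :: rest =>
      let l' := solInner i N l
      if PySem.List.pyGetD l' i 0 > N then some i else solLoop N l' rest

def solution (q_input : Int) : Option Int :=
  let N := PySem.Int.floordiv q_input 10
  solLoop N (List.replicate N.toNat 0) (PySem.List.pyRange 1 N 1)

-- ===== PORT B =====
-- 's = 0; d = 1; while d*d <= i: if i % d == 0: s += d; c = i//d; if d != c: s += c; d += 1'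
def divSumAux (i d s : Int) : Int :=
  if _h : d * d ≤ i then
    divSumAux i (d + 1)
      (if PySem.Int.mod i d = 0 then
        (let c := PySem.Int.floordiv i d
         if d ≠ c then s + d + c else s + d)
       else s)
  else s
termination_by (i + 1 - d).toNat
decreasing_by
  have hdi : d ≤ i := by nlinarith
  omega

def divSum (i : Int) : Int := divSumAux i 1 0

def solLoopB (N : Int) : List Int → Option Int
  | [] => none
  | i :: rest => if divSum i > N then some i else solLoopB N rest

def solution_alt (q_input : Int) : Option Int :=
  let N := PySem.Int.floordiv q_input 10
  solLoopB N (PySem.List.pyRange 1 N 1)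

-- ===== PRECONDITION & SPEC =====
def Spec_solution (q_input : Int) (out : Option Int) : Prop := out = solution_alt q_input
instance (q_input : Int) (out : Option Int) : Decidable (Spec_solution q_input out) := by unfold Spec_solution; infer_instance

-- ===== CLAIM (what is proved, stated in full; the proofs are below) =====
def Claim_equal_solution : Prop := ∀ (q_input : Int), Dom_solution q_input → Spec_solution q_input (solution q_input)

-- ===== LEMMAS AND PROOFS =====

-- partial divisor sum: sum of d in [1, K] dividing m, in B's foldl form
def pSig (m K : Int) : Int :=
  (PySem.List.pyRange 1 (K + 1) 1).foldl
    (fun s d => if PySem.Int.mod m d = 0 then s + d else s) 0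

theorem pSig_zero (m : Int) : pSig m 0 = 0 := by
  simp [pSig]

theorem pSig_step (m K : Int) (hK : 1 ≤ K) :
    pSig m K = pSig m (K - 1) + (if K ∣ m then K else 0) := by
  unfold pSig
  rw [PySem.List.pyRange_one_append 1 K (K + 1) (by omega) (by omega),
      List.foldl_append]
  rw [PySem.List.pyRange_one_singleton K]
  simp only [List.foldl_cons, List.foldl_nil]
  have hKK : K - 1 + 1 = K := by omega
  rw [hKK]
  by_cases h : K ∣ m
  · rw [if_pos ((PySem.Int.mod_eq_zero_iff_dvd m K).mpr h), if_pos h]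
  · rw [if_neg (fun hc => h ((PySem.Int.mod_eq_zero_iff_dvd m K).mp hc)), if_neg h, add_zero]

-- pSig as a Finset sum
theorem pSig_eq_sum_nat (m : Int) : ∀ (n : Nat),
    pSig m (n : Int) = ∑ d ∈ Finset.Icc 1 (n : Int), (if d ∣ m then d else 0) := by
  intro n
  induction n with
  | zero =>
    rw [show ((0:Nat):Int) = 0 by norm_num, pSig_zero]
    simp
  | succ n ih =>
    have hc : ((n + 1 : Nat) : Int) = (n : Int) + 1 := by push_cast; ring
    rw [hc, pSig_step m ((n:Int) + 1) (by omega)]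
    have h1 : (n:Int) + 1 - 1 = (n:Int) := by omega
    rw [h1, ih]
    rw [show Finset.Icc (1:Int) ((n:Int)+1) = insert ((n:Int)+1) (Finset.Icc 1 (n:Int)) by
          ext x; simp only [Finset.mem_Icc, Finset.mem_insert]; omega,
        Finset.sum_insert (by simp only [Finset.mem_Icc]; omega)]
    ring

theorem pSig_eq_sum (m K : Int) (hK : 0 ≤ K) :
    pSig m K = ∑ d ∈ Finset.Icc 1 K, (if d ∣ m then d else 0) := by
  have h : K = (K.toNat : Int) := by omega
  rw [h, pSig_eq_sum_nat m K.toNat]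

-- the while-loop accumulates the sqrt-bounded divisor/cofactor sum
theorem divSumAux_spec (i : Int) (hi : 1 ≤ i) :
    ∀ (fuel : Nat) (d s : Int), 1 ≤ d → fuel = (i + 1 - d).toNat →
    divSumAux i d s
      = s + ∑ e ∈ Finset.Icc d i,
          (if e * e ≤ i ∧ e ∣ i then e + (if e ≠ i / e then i / e else 0) else 0) := by
  intro fuel
  induction fuel with
  | zero =>
    intro d s hd hfuel
    have hdi : i < d := by omega
    have hguard : ¬ d * d ≤ i := by nlinarith
    rw [divSumAux, dif_neg hguard]
    rw [Finset.Icc_eq_empty (by omega)]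
    simp
  | succ fuel ih =>
    intro d s hd hfuel
    by_cases hguard : d * d ≤ i
    · have hdi : d ≤ i := by nlinarith
      rw [divSumAux, dif_pos hguard, ih (d + 1) _ (by omega) (by omega)]
      rw [show Finset.Icc d i = insert d (Finset.Icc (d+1) i) by
            ext x; simp only [Finset.mem_Icc, Finset.mem_insert]; omega,
          Finset.sum_insert (by simp only [Finset.mem_Icc]; omega)]
      have hfd : PySem.Int.floordiv i d = i / d := PySem.Int.floordiv_eq_ediv_of_pos (by omega)
      have hbody :
          (if PySem.Int.mod i d = 0 then
            (let c := PySem.Int.floordiv i d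
             if d ≠ c then s + d + c else s + d)
           else s)
          = s + (if d * d ≤ i ∧ d ∣ i then d + (if d ≠ i / d then i / d else 0) else 0) := by
        simp only [hfd]
        by_cases hdvd : d ∣ i
        · rw [if_pos ((PySem.Int.mod_eq_zero_iff_dvd i d).mpr hdvd)]
          simp only [ne_eq]
          rw [if_pos (show d * d ≤ i ∧ d ∣ i from ⟨hguard, hdvd⟩)]
          by_cases hne : d = i / d
          · rw [if_neg (fun hcon => hcon hne)]
            simp [← hne]
          · rw [if_pos hne]
            simp only [hne, not_false_eq_true, if_true]
            ring
        · rw [if_neg (fun hc => hdvd ((PySem.Int.mod_eq_zero_iff_dvd i d).mp hc)),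
              if_neg (by rintro ⟨_, h2⟩; exact hdvd h2)]
          ring
      rw [hbody]
      ring
    · rw [divSumAux, dif_neg hguard]
      rw [Finset.sum_eq_zero, add_zero]
      intro e he
      rw [Finset.mem_Icc] at he
      rw [if_neg]
      rintro ⟨h1, _⟩
      nlinarith [he.1, he.2]

-- pairing d ↦ i/d : the sqrt-bounded sum equals the full divisor sum
theorem sqrt_sum_eq_divisor_sum (i : Int) (hi : 1 ≤ i) :
    (∑ e ∈ Finset.Icc 1 i,
        (if e * e ≤ i ∧ e ∣ i then e + (if e ≠ i / e then i / e else 0) else 0))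
      = ∑ d ∈ Finset.Icc 1 i, (if d ∣ i then d else 0) := by
  rw [← Finset.sum_filter, ← Finset.sum_filter]
  set D : Finset Int := (Finset.Icc 1 i).filter (fun d => d ∣ i) with hD
  have hDmem : ∀ d, d ∈ D ↔ (1 ≤ d ∧ d ≤ i ∧ d ∣ i) := by
    intro d; simp [hD, Finset.mem_filter, Finset.mem_Icc, and_assoc]
  have hfilter : (Finset.Icc 1 i).filter (fun e => e * e ≤ i ∧ e ∣ i)
      = D.filter (fun e => e * e ≤ i) := by
    rw [hD, Finset.filter_filter]
    apply Finset.filter_congr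
    intro x _
    simp [and_comm]
  rw [hfilter]
  rw [← Finset.sum_filter_add_sum_filter_not D (fun d => d * d ≤ i) (fun d => d)]
  rw [Finset.sum_add_distrib]
  congr 1
  rw [← Finset.sum_filter, Finset.filter_filter]
  -- cofactor facts
  have key : ∀ e, 1 ≤ e → e ∣ i → (1 ≤ i / e ∧ i / e ≤ i ∧ i / e ∣ i ∧ e * (i / e) = i ∧ i / (i / e) = e) := by
    intro e he hdvd
    have hne : e ≠ 0 := by omega
    have hmul : e * (i / e) = i := Int.mul_ediv_cancel' hdvd
    have hq1 : 1 ≤ i / e := by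
      by_contra hq
      push Not at hq
      nlinarith
    have hqd : i / e ∣ i := ⟨e, by linarith [hmul, mul_comm e (i / e)]⟩
    have hqle : i / e ≤ i := by nlinarith
    have hback : i / (i / e) = e := by
      have hqne : i / e ≠ 0 := by omega
      calc i / (i / e) = (i / e * e) / (i / e) := by rw [mul_comm e (i/e)] at hmul; rw [hmul]
        _ = e := Int.mul_ediv_cancel_left e hqne
    exact ⟨hq1, hqle, hqd, hmul, hback⟩
  apply Finset.sum_nbij' (fun e => i / e) (fun d => i / d)
  · -- maps into big divisors
    intro e he
    rw [Finset.mem_filter] at he ⊢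
    obtain ⟨heD, hsq, hne⟩ := he
    obtain ⟨h1, h2, h3⟩ := (hDmem e).mp heD
    obtain ⟨hq1, hqle, hqd, hmul, _⟩ := key e h1 h3
    refine ⟨(hDmem _).mpr ⟨hq1, hqle, hqd⟩, ?_⟩
    have helt : e < i / e := by
      rcases lt_or_eq_of_le (show e ≤ i / e by nlinarith) with h | h
      · exact h
      · exact absurd h hne
    nlinarith
  · -- maps back into small distinct divisors
    intro d hdm
    rw [Finset.mem_filter] at hdm ⊢
    obtain ⟨hdD, hbig⟩ := hdm
    obtain ⟨h1, h2, h3⟩ := (hDmem d).mp hdD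
    obtain ⟨hq1, hqle, hqd, hmul, hback⟩ := key d h1 h3
    push Not at hbig
    have hlt : i / d < d := by nlinarith
    refine ⟨(hDmem _).mpr ⟨hq1, hqle, hqd⟩, by nlinarith, ?_⟩
    rw [hback]
    omega
  · intro e he
    rw [Finset.mem_filter] at he
    obtain ⟨h1, _, h3⟩ := (hDmem e).mp he.1
    exact (key e h1 h3).2.2.2.2
  · intro d hdm
    rw [Finset.mem_filter] at hdm
    obtain ⟨h1, _, h3⟩ := (hDmem d).mp hdm.1
    exact (key d h1 h3).2.2.2.2
  · intro e _
    rfl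

theorem divSum_eq_pSig (i : Int) (hi : 1 ≤ i) : divSum i = pSig i i := by
  rw [divSum, divSumAux_spec i hi (i + 1 - 1).toNat 1 0 le_rfl rfl, zero_add,
      sqrt_sum_eq_divisor_sum i hi, pSig_eq_sum i i (by omega)]

theorem length_foldl_set (js : List Int) (l : List Int)
    (f : List Int → Int → Int) :
    (js.foldl (fun l j => PySem.List.pySetD l j (f l j)) l).length = l.length := by
  induction js generalizing l with
  | nil => rfl
  | cons j js ih => simp [List.foldl_cons, ih, PySem.List.length_pySetD]

-- fold of 'l[j] += v' over js adds (count of m in js) * v at slot m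
theorem foldl_addAt (js : List Int) (l : List Int) (v m : Int)
    (hjs : ∀ j ∈ js, 0 ≤ j ∧ j < (l.length : Int)) (hm : 0 ≤ m) :
    PySem.List.pyGetD (js.foldl (fun l j => PySem.List.pySetD l j (PySem.List.pyGetD l j 0 + v)) l) m 0
      = PySem.List.pyGetD l m 0 + (js.count m : Int) * v := by
  induction js generalizing l with
  | nil => simp
  | cons j js ih =>
    obtain ⟨hj0, hjlen⟩ := hjs j (List.mem_cons_self ..)
    have hset : PySem.List.pySetD l j (PySem.List.pyGetD l j 0 + v)
        = l.set j.toNat (PySem.List.pyGetD l j 0 + v) :=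
      PySem.List.pySetD_of_nonneg l _ hj0
    have hlen' : ((l.set j.toNat (PySem.List.pyGetD l j 0 + v)).length : Int) = (l.length : Int) := by
      simp
    rw [List.foldl_cons, hset, ih _ (fun x hx => by
      obtain ⟨h0, h1⟩ := hjs x (List.mem_cons_of_mem _ hx); exact ⟨h0, by rw [hlen']; exact h1⟩)]
    have hget : PySem.List.pyGetD (l.set j.toNat (PySem.List.pyGetD l j 0 + v)) m 0
        = PySem.List.pyGetD l m 0 + (if j = m then v else 0) := by
      by_cases hjm : j = m
      · subst hjm
        rw [if_pos rfl,
            PySem.List.pyGetD_eq_getElem _ _ hj0 (by simpa using hjlen),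
            PySem.List.pyGetD_eq_getElem _ _ hj0 hjlen]
        simp [List.getElem_set_self]
      · rw [if_neg hjm, add_zero]
        by_cases hmlen : m < (l.length : Int)
        · rw [PySem.List.pyGetD_eq_getElem _ _ hm (by simpa using hmlen),
              PySem.List.pyGetD_eq_getElem _ _ hm hmlen]
          rw [List.getElem_set_ne (by omega)]
        · rw [PySem.List.pyGetD_of_none _ _ _ (by
              rw [PySem.List.pyGet?_eq_none_iff]; rintro ⟨h1, h2⟩; simp at h2; omega),
            PySem.List.pyGetD_of_none _ _ _ (by
              rw [PySem.List.pyGet?_eq_none_iff]; rintro ⟨h1, h2⟩; omega)]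
    rw [hget]
    have hcount : (((j :: js).count m : Int)) = (js.count m : Int) + (if j = m then 1 else 0) := by
      by_cases hjm : j = m <;> simp [hjm]
    rw [hcount]
    by_cases hjm : j = m
    · simp [hjm]; ring
    · simp [hjm]

-- the multiples list pyRange i N i contains m once iff i ∣ m, i ≤ m, m < N
theorem count_pyRange_step (i N m : Int) (hi : 1 ≤ i) :
    ((PySem.List.pyRange i N i).count m : Int)
      = if i ∣ m ∧ i ≤ m ∧ m < N then 1 else 0 := by
  have hnd : (PySem.List.pyRange i N i).Nodup := by
    rw [PySem.List.pyRange_of_pos i N (by omega)]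
    refine List.Nodup.map ?_ (List.nodup_range)
    intro a b hab
    have h2 : i * (a : Int) = i * (b : Int) := by linarith
    have := mul_left_cancel₀ (by omega : i ≠ 0) h2
    exact_mod_cast this
  have hmem := PySem.List.mem_pyRange_iff_of_pos (a := i) (b := N) (s := i) (by omega) m
  by_cases h : i ∣ m ∧ i ≤ m ∧ m < N
  · rw [if_pos h]
    have hin : m ∈ PySem.List.pyRange i N i := by
      rw [hmem]
      exact ⟨h.2.1, h.2.2, (dvd_sub_right h.1).mpr dvd_rfl⟩
    exact_mod_cast List.count_eq_one_of_mem hnd hin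
  · rw [if_neg h]
    have hout : m ∉ PySem.List.pyRange i N i := by
      rw [hmem]
      rintro ⟨h1, h2, h3⟩
      have hdvd : i ∣ m := by
        have hm : m = (m - i) + i := by ring
        rw [hm]; exact dvd_add h3 dvd_rfl
      exact h ⟨hdvd, h1, h2⟩
    exact_mod_cast List.count_eq_zero_of_not_mem hout

-- effect of the inner loop on slot m
theorem solInner_get (i N m : Int) (l : List Int) (hi : 1 ≤ i)
    (hlen : ∀ j : Int, 1 ≤ j → j < N → j < (l.length : Int)) (hm : 0 ≤ m) :
    PySem.List.pyGetD (solInner i N l) m 0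
      = PySem.List.pyGetD l m 0 + (if i ∣ m ∧ i ≤ m ∧ m < N then i else 0) := by
  unfold solInner
  rw [foldl_addAt _ _ _ _ (fun j hj => by
        rw [PySem.List.mem_pyRange_iff_of_pos (by omega) j] at hj
        exact ⟨by omega, hlen j (by omega) (by omega)⟩) hm,
      count_pyRange_step i N m hi]
  by_cases h : i ∣ m ∧ i ≤ m ∧ m < N <;> simp [h]

theorem length_solInner (i N : Int) (l : List Int) :
    (solInner i N l).length = l.length :=
  length_foldl_set _ _ _

-- main invariant: if every live slot k ≤ m < N holds pSig m (k-1), the loops agree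
theorem loop_agree (fuel : Nat) : ∀ (N k : Int) (l : List Int), 1 ≤ k →
    (∀ j : Int, 1 ≤ j → j < N → j < (l.length : Int)) → fuel = (N - k).toNat →
    (∀ m : Int, k ≤ m → m < N → PySem.List.pyGetD l m 0 = pSig m (k - 1)) →
    solLoop N l (PySem.List.pyRange k N 1) = solLoopB N (PySem.List.pyRange k N 1) := by
  induction fuel with
  | zero =>
    intro N k l hk hlen hfuel hinv
    rw [PySem.List.pyRange_one_eq_nil (by omega)]
    rfl
  | succ fuel ih =>
    intro N k l hk hlen hfuel hinv
    by_cases hkN : k < N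
    · rw [PySem.List.pyRange_one_cons hkN]
      show solLoop N l (k :: _) = solLoopB N (k :: _)
      rw [solLoop, solLoopB]
      have hkey : PySem.List.pyGetD (solInner k N l) k 0 = divSum k := by
        rw [solInner_get k N k l hk hlen (by omega),
            hinv k le_rfl hkN, divSum_eq_pSig k hk,
            pSig_step k k hk, if_pos (dvd_refl k),
            if_pos (show k ∣ k ∧ k ≤ k ∧ k < N from ⟨dvd_refl k, le_rfl, hkN⟩)]
      simp only [hkey]
      by_cases hc : divSum k > N
      · rw [if_pos hc, if_pos hc]
      · rw [if_neg hc, if_neg hc]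
        exact ih N (k + 1) (solInner k N l) (by omega)
          (fun j hj1 hj2 => by
            have := hlen j hj1 hj2
            rw [show ((solInner k N l).length : Int) = (l.length : Int) by
              rw [length_solInner]]
            exact this) (by omega)
          (fun m hm1 hm2 => by
            rw [solInner_get k N m l hk hlen (by omega),
                hinv m (by omega) hm2]
            have hk1 : k + 1 - 1 = k := by omega
            rw [hk1, pSig_step m k hk]
            by_cases hd : k ∣ m
            · rw [if_pos hd, if_pos ⟨hd, by omega, hm2⟩]
            · rw [if_neg hd, if_neg (by rintro ⟨h1, _, _⟩; exact hd h1)])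
    · rw [PySem.List.pyRange_one_eq_nil (by omega)]
      rfl

-- ===== VERDICT (by name: the statement is the Claim_ definition above) =====
theorem solution_spec : Claim_equal_solution := by
  intro q _
  unfold Spec_solution solution solution_alt
  apply loop_agree (PySem.Int.floordiv q 10 - 1).toNat _ 1 _ le_rfl
  · intro j hj1 hj2
    simp only [List.length_replicate]
    omega
  · rfl
  · intro m hm1 hm2
    rw [show (1:Int) - 1 = 0 by omega, pSig_zero]
    by_cases hlt : m < ((List.replicate (PySem.Int.floordiv q 10).toNat (0:Int)).length : Int)
    · rw [PySem.List.pyGetD_eq_getElem _ _ (by omega) hlt]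
      simp
    · rw [PySem.List.pyGetD_of_none _ _ _ (by
        rw [PySem.List.pyGet?_eq_none_iff]; rintro ⟨h1, h2⟩; omega)]
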